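-- pv_equiv track=rewrite | github.com/Polymer/news | lib/bcrypt/bcrypt.py | decode_base64
-- ===== SOURCE A (Python) =====
-- BCRYPT_MAXSALT = 16
--
-- index_64 = [
--     255, 255, 255, 255, 255, 255, 255, 255, 255, 255,
--     255, 255, 255, 255, 255, 255, 255, 255, 255, 255,
--     255, 255, 255, 255, 255, 255, 255, 255, 255, 255,
--     255, 255, 255, 255, 255, 255, 255, 255, 255, 255,
--     255, 255, 255, 255, 255, 255, 0, 1, 54, 55,
--     56, 57, 58, 59, 60, 61, 62, 63, 255, 255,
--     255, 255, 255, 255, 255, 2, 3, 4, 5, 6,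
--     7, 8, 9, 10, 11, 12, 13, 14, 15, 16,
--     17, 18, 19, 20, 21, 22, 23, 24, 25, 26, 27,
--     255, 255, 255, 255, 255, 255, 28, 29, 30,
--     31, 32, 33, 34, 35, 36, 37, 38, 39, 40,
--     41, 42, 43, 44, 45, 46, 47, 48, 49, 50,
--     51, 52, 53, 255, 255, 255, 255, 255]
--
-- def CHAR64(c):
--     return 255 if ord(c) > 127 else index_64[ord(c)]
--
-- def decode_base64(data):
--     dest_index = 0
--     result = []
--     for src_index in range(0, len(data), 4):
--         c1 = CHAR64(data[src_index])
--
--         if src_index + 1 >= len(data):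
--             break
--
--         c2 = CHAR64(data[src_index+1])
--
--         # Invalid data */
--         if c1 == 255 or c2 == 255:
--             break
--
--         result.append((c1 << 2) | ((c2 & 0x30) >> 4))
--         dest_index += 1
--
--         if src_index + 2 >= len(data) or dest_index == BCRYPT_MAXSALT:
--             break
--
--         c3 = CHAR64(data[src_index + 2])
--         if c3 == 255:
--             break
--
--         result.append(((c2 & 0x0f) << 4) | ((c3 & 0x3c) >> 2))
--         dest_index += 1
--
--         if src_index + 3 >= len(data) or dest_index == BCRYPT_MAXSALT:
--             break
--
--         c4 = CHAR64(data[src_index + 3])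
--         if c4 == 255:
--             break
--
--         result.append(((c3 & 0x03) << 6) | c4)
--         dest_index += 1
--
--         if dest_index == BCRYPT_MAXSALT:
--             break
--
--     return result
-- ===== SOURCE B (Python) =====
-- index_64 = [
--     255, 255, 255, 255, 255, 255, 255, 255, 255, 255,
--     255, 255, 255, 255, 255, 255, 255, 255, 255, 255,
--     255, 255, 255, 255, 255, 255, 255, 255, 255, 255,
--     255, 255, 255, 255, 255, 255, 255, 255, 255, 255,
--     255, 255, 255, 255, 255, 255, 0, 1, 54, 55,
--     56, 57, 58, 59, 60, 61, 62, 63, 255, 255,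
--     255, 255, 255, 255, 255, 2, 3, 4, 5, 6,
--     7, 8, 9, 10, 11, 12, 13, 14, 15, 16,
--     17, 18, 19, 20, 21, 22, 23, 24, 25, 26, 27,
--     255, 255, 255, 255, 255, 255, 28, 29, 30,
--     31, 32, 33, 34, 35, 36, 37, 38, 39, 40,
--     41, 42, 43, 44, 45, 46, 47, 48, 49, 50,
--     51, 52, 53, 255, 255, 255, 255, 255]
--
-- def CHAR64(c):
--     return 255 if ord(c) > 127 else index_64[ord(c)]
--
-- def decode_base64(data):
--     result = []
--     acc = 0
--     nbits = 0
--     for c in data: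
--         v = CHAR64(c)
--         if v == 255:
--             break
--         acc = (acc << 6) | v
--         nbits += 6
--         if nbits >= 8:
--             nbits -= 8
--             result.append((acc >> nbits) & 0xFF)
--             if len(result) == 16:
--                 break
--     return result
-- ===== Notes on version B (the rewrite author's own statement) =====
-- stated objective: simpler
-- what changed: Replaces A's four-characters-per-iteration loop (three bytes assembled via fixed shift/mask formulas with staged break points) by a streaming 6-bit accumulator that processes one character at a time and emits a byte whenever 8 bits are available.
import Mathlib
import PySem

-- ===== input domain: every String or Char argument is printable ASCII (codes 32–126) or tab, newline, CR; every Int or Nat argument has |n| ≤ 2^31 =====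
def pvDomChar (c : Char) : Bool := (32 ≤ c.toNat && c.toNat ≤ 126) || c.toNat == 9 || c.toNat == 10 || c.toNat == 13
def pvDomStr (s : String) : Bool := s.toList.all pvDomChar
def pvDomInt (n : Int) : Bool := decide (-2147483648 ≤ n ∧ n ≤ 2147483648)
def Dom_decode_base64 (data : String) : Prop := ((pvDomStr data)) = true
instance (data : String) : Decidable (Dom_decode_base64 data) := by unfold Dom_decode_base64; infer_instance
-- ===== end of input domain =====

-- B replaces A's four-chars-per-iteration loop (three bytes assembled from fixed bit masks,
-- with break points after each byte) by a streaming 6-bit accumulator that emits a byte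
-- whenever 8 bits are available — simpler: one uniform loop body instead of four staged ones.

-- ===== PORT A =====
-- shared module constants/helpers (identical in Source A and Source B)
def BCRYPT_MAXSALT : Int := 16

def index64 : List Int := [
    255, 255, 255, 255, 255, 255, 255, 255, 255, 255,
    255, 255, 255, 255, 255, 255, 255, 255, 255, 255,
    255, 255, 255, 255, 255, 255, 255, 255, 255, 255,
    255, 255, 255, 255, 255, 255, 255, 255, 255, 255,
    255, 255, 255, 255, 255, 255, 0, 1, 54, 55,
    56, 57, 58, 59, 60, 61, 62, 63, 255, 255,
    255, 255, 255, 255, 255, 2, 3, 4, 5, 6,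
    7, 8, 9, 10, 11, 12, 13, 14, 15, 16,
    17, 18, 19, 20, 21, 22, 23, 24, 25, 26, 27,
    255, 255, 255, 255, 255, 255, 28, 29, 30,
    31, 32, 33, 34, 35, 36, 37, 38, 39, 40,
    41, 42, 43, 44, 45, 46, 47, 48, 49, 50,
    51, 52, 53, 255, 255, 255, 255, 255]

-- index_64[ord(c)] is always in range when ord(c) ≤ 127 (the list has 128 entries)
def CHAR64 (c : Char) : Int :=
  if c.toNat > 127 then 255 else PySem.List.pyGetD index64 (c.toNat : Int) 0

-- A's `for src_index in range(0, len(data), 4)` with its breaks, as recursion on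
-- four-character chunks; `dest` is A's dest_index, the bytes produced so far.
def decodeLoopA : List Char → Int → List Int
  | [], _ => []
  | [_], _ => []          -- c1 is computed, then `src_index + 1 >= len(data)` breaks
  | c1' :: c2' :: rest, dest =>
    let c1 := CHAR64 c1'
    let c2 := CHAR64 c2'
    if c1 = 255 ∨ c2 = 255 then []
    else
      let b1 := PySem.Int.bor (c1 <<< 2) (PySem.Int.band c2 48 >>> 4)
      match rest with
      | [] => [b1]
      | c3' :: rest2 =>
        if dest + 1 = BCRYPT_MAXSALT then [b1]
        else
          let c3 := CHAR64 c3'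
          if c3 = 255 then [b1]
          else
            let b2 := PySem.Int.bor (PySem.Int.band c2 15 <<< 4) (PySem.Int.band c3 60 >>> 2)
            match rest2 with
            | [] => [b1, b2]
            | c4' :: rest3 =>
              if dest + 2 = BCRYPT_MAXSALT then [b1, b2]
              else
                let c4 := CHAR64 c4'
                if c4 = 255 then [b1, b2]
                else
                  let b3 := PySem.Int.bor (PySem.Int.band c3 3 <<< 6) c4
                  if dest + 3 = BCRYPT_MAXSALT then [b1, b2, b3]
                  else b1 :: b2 :: b3 :: decodeLoopA rest3 (dest + 3)

def decode_base64 (data : String) : List Int := decodeLoopA data.toList 0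

-- ===== PORT B =====
-- B's streaming loop; nbits is Source B's `nbits`, which never goes negative (it stays in
-- {0,2,4,6} at the top of the loop), so it is tracked as a Nat — exact for Source B.
def decodeLoopB : List Char → Int → Nat → List Int → List Int
  | [], _, _, result => result
  | c :: cs, acc, nbits, result =>
    let v := CHAR64 c
    if v = 255 then result
    else
      let acc' := PySem.Int.bor (acc <<< 6) v
      let nbits' := nbits + 6
      if 8 ≤ nbits' then
        let nbits'' := nbits' - 8
        let result' := result ++ [PySem.Int.band (acc' >>> nbits'') 255]
        if PySem.List.len result' = 16 then result'
        else decodeLoopB cs acc' nbits'' result'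
      else decodeLoopB cs acc' nbits' result

def decode_base64_alt (data : String) : List Int := decodeLoopB data.toList 0 0 []

-- ===== PRECONDITION & SPEC =====
def Spec_decode_base64 (data : String) (out : List Int) : Prop := out = decode_base64_alt data
instance (data : String) (out : List Int) : Decidable (Spec_decode_base64 data out) := by unfold Spec_decode_base64; infer_instance

-- ===== CLAIM (what is proved, stated in full; the proofs are below) =====
def Claim_equal_decode_base64 : Prop := ∀ (data : String), Dom_decode_base64 data → Spec_decode_base64 data (decode_base64 data)

-- ===== LEMMAS AND PROOFS =====

-- Nat-level bit facts used to relate the two loops' byte computations.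
theorem pvOrAdd (a b k : Nat) (h : b < 2 ^ k) : (a <<< k) ||| b = a <<< k + b := by
  apply Nat.eq_of_testBit_eq
  intro j
  have hrhs : a <<< k + b = 2 ^ k * a + b := by rw [Nat.shiftLeft_eq, Nat.mul_comm]
  rw [hrhs, Nat.testBit_two_pow_mul_add a h j, Nat.testBit_or, Nat.testBit_shiftLeft]
  rcases Nat.lt_or_ge j k with hj | hj
  · simp [Nat.not_le.mpr hj, hj]
  · simp [hj, Nat.not_lt.mpr hj,
      Nat.testBit_lt_two_pow (Nat.lt_of_lt_of_le h (Nat.pow_le_pow_right (by norm_num) hj))]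

theorem pvMaskFacts : ∀ m : Nat, m < 64 →
    (m &&& 48) >>> 4 = m / 16 ∧ m &&& 15 = m % 16 ∧ (m &&& 60) >>> 2 = m / 4 ∧ m &&& 3 = m % 4 := by
  decide

theorem pvAnd255 (x : Nat) : x &&& 255 = x % 256 := by
  have := Nat.and_two_pow_sub_one_eq_mod x 8
  norm_num at this; omega

theorem pvE1 (a m1 m2 : Nat) (h1 : m1 < 64) (h2 : m2 < 64) :
    (((a <<< 6 ||| m1) <<< 6 ||| m2) >>> 4) &&& 255 = m1 <<< 2 ||| ((m2 &&& 48) >>> 4) := by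
  rw [pvOrAdd _ _ 6 (by omega), pvOrAdd _ _ 6 (by omega), (pvMaskFacts m2 h2).1,
    pvOrAdd _ _ 2 (by omega), pvAnd255, Nat.shiftRight_eq_div_pow]
  simp only [Nat.shiftLeft_eq]
  omega

theorem pvE2 (a m1 m2 m3 : Nat) (h1 : m1 < 64) (h2 : m2 < 64) (h3 : m3 < 64) :
    ((((a <<< 6 ||| m1) <<< 6 ||| m2) <<< 6 ||| m3) >>> 2) &&& 255
      = (m2 &&& 15) <<< 4 ||| ((m3 &&& 60) >>> 2) := by
  rw [pvOrAdd _ _ 6 (by omega), pvOrAdd _ _ 6 (by omega), pvOrAdd _ _ 6 (by omega),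
    (pvMaskFacts m2 h2).2.1, (pvMaskFacts m3 h3).2.2.1,
    pvOrAdd _ _ 4 (by omega), pvAnd255, Nat.shiftRight_eq_div_pow]
  simp only [Nat.shiftLeft_eq]
  omega

theorem pvE3 (a m1 m2 m3 m4 : Nat) (h1 : m1 < 64) (h2 : m2 < 64) (h3 : m3 < 64) (h4 : m4 < 64) :
    ((((a <<< 6 ||| m1) <<< 6 ||| m2) <<< 6 ||| m3) <<< 6 ||| m4) &&& 255
      = (m3 &&& 3) <<< 6 ||| m4 := by
  rw [pvOrAdd _ _ 6 (by omega), pvOrAdd _ _ 6 (by omega), pvOrAdd _ _ 6 (by omega),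
    pvOrAdd _ _ 6 (by omega), (pvMaskFacts m3 h3).2.2.2, pvOrAdd _ _ 6 (by omega), pvAnd255]
  simp only [Nat.shiftLeft_eq]
  omega

-- Int ↔ Nat cast bridges for the bit operators appearing in the ports.
theorem pvShl2 (m : Nat) : ((m : Int) <<< (2 : Int)) = ((m <<< 2 : Nat) : Int) := rfl
theorem pvShl4 (m : Nat) : ((m : Int) <<< (4 : Int)) = ((m <<< 4 : Nat) : Int) := rfl
theorem pvShl6 (m : Nat) : ((m : Int) <<< (6 : Int)) = ((m <<< 6 : Nat) : Int) := rfl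
theorem pvShr2 (m : Nat) : ((m : Int) >>> (2 : Int)) = ((m >>> 2 : Nat) : Int) := rfl
theorem pvShr4 (m : Nat) : ((m : Int) >>> (4 : Int)) = ((m >>> 4 : Nat) : Int) := rfl
theorem pvShrN (m k : Nat) : ((m : Int) >>> k) = ((m >>> k : Nat) : Int) := rfl
theorem pvBand48 (m : Nat) : PySem.Int.band (m : Int) 48 = ((m &&& 48 : Nat) : Int) := by
  rw [show (48 : Int) = ((48 : Nat) : Int) from rfl, PySem.Int.band_natCast]
theorem pvBand15 (m : Nat) : PySem.Int.band (m : Int) 15 = ((m &&& 15 : Nat) : Int) := by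
  rw [show (15 : Int) = ((15 : Nat) : Int) from rfl, PySem.Int.band_natCast]
theorem pvBand60 (m : Nat) : PySem.Int.band (m : Int) 60 = ((m &&& 60 : Nat) : Int) := by
  rw [show (60 : Int) = ((60 : Nat) : Int) from rfl, PySem.Int.band_natCast]
theorem pvBand3 (m : Nat) : PySem.Int.band (m : Int) 3 = ((m &&& 3 : Nat) : Int) := by
  rw [show (3 : Int) = ((3 : Nat) : Int) from rfl, PySem.Int.band_natCast]
theorem pvBand255 (m : Nat) : PySem.Int.band (m : Int) 255 = ((m &&& 255 : Nat) : Int) := by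
  rw [show (255 : Int) = ((255 : Nat) : Int) from rfl, PySem.Int.band_natCast]

-- CHAR64 returns 255 or a six-bit value.
theorem pvIdx64 : ∀ n : Nat, n < 128 →
    index64.getD n (0 : Int) = 255 ∨ (0 ≤ index64.getD n (0 : Int) ∧ index64.getD n (0 : Int) < 64) := by
  decide

theorem pvCHAR64_cases (c : Char) : CHAR64 c = 255 ∨ ∃ m : Nat, m < 64 ∧ CHAR64 c = (m : Int) := by
  unfold CHAR64
  by_cases h : c.toNat > 127
  · simp [h]
  · have hlt : c.toNat < 128 := by omega
    simp only [h, if_false, PySem.List.pyGetD_natCast]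
    rcases pvIdx64 c.toNat hlt with h255 | ⟨h0, h64⟩
    · exact Or.inl h255
    · exact Or.inr ⟨(index64.getD c.toNat 0).toNat, by omega, by omega⟩

theorem pvMain : ∀ (n : Nat) (cs : List Char), cs.length = n → ∀ (r : List Int) (a : Nat),
    r.length < 16 → decodeLoopB cs (a : Int) 0 r = r ++ decodeLoopA cs (r.length : Int) := by
  intro n
  induction n using Nat.strong_induction_on with
  | _ n ih =>
    intro cs hcs r a hr
    rcases cs with _ | ⟨c1, cs1⟩
    · simp [decodeLoopA, decodeLoopB]
    rcases cs1 with _ | ⟨c2, rest⟩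
    · -- one char: both return r
      rcases pvCHAR64_cases c1 with h1 | ⟨m1, hm1, h1⟩
      · simp [decodeLoopA, decodeLoopB, h1]
      · have hne1 : (m1 : Int) ≠ 255 := by omega
        simp [decodeLoopA, decodeLoopB, h1, hne1]
    -- at least two chars
    rcases pvCHAR64_cases c1 with h1 | ⟨m1, hm1, h1⟩
    · simp [decodeLoopA, decodeLoopB, h1]
    have hne1 : (m1 : Int) ≠ 255 := by omega
    rcases pvCHAR64_cases c2 with h2 | ⟨m2, hm2, h2⟩
    · simp [decodeLoopA, decodeLoopB, h1, h2, hne1]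
    have hne2 : (m2 : Int) ≠ 255 := by omega
    rcases rest with _ | ⟨c3, rest2⟩
    · -- exactly two chars: both return r ++ [first byte]
      simp [decodeLoopA, decodeLoopB, h1, h2, hne1, hne2, pvShl2, pvShl6, pvShr4, pvShrN, -Int.natCast_shiftRight, -Int.natCast_shiftLeft,
        pvBand48, pvBand255, PySem.Int.bor_natCast, pvE1 a m1 m2 hm1 hm2]
    by_cases hc1 : r.length = 15
    · -- cap reached after the first byte
      simp [decodeLoopA, decodeLoopB, h1, h2, hne1, hne2, pvShl2, pvShl6, pvShr4, pvShrN, -Int.natCast_shiftRight, -Int.natCast_shiftLeft,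
        pvBand48, pvBand255, PySem.Int.bor_natCast, pvE1 a m1 m2 hm1 hm2,
        BCRYPT_MAXSALT, PySem.List.len_eq, hc1]
    have hx1 : ¬((r.length : Int) + 1 = 16) := by omega
    rcases pvCHAR64_cases c3 with h3 | ⟨m3, hm3, h3⟩
    · simp [decodeLoopA, decodeLoopB, h1, h2, h3, hne1, hne2, pvShl2, pvShl6, pvShr4, pvShrN, -Int.natCast_shiftRight, -Int.natCast_shiftLeft,
        pvBand48, pvBand255, PySem.Int.bor_natCast, pvE1 a m1 m2 hm1 hm2,
        BCRYPT_MAXSALT, PySem.List.len_eq, hx1]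
    have hne3 : (m3 : Int) ≠ 255 := by omega
    rcases rest2 with _ | ⟨c4, rest3⟩
    · -- exactly three chars: both return r ++ [byte1, byte2]
      simp [decodeLoopA, decodeLoopB, h1, h2, h3, hne1, hne2, hne3, pvShl2, pvShl4, pvShl6,
        pvShr2, pvShr4, pvShrN, -Int.natCast_shiftRight, -Int.natCast_shiftLeft, pvBand48, pvBand15, pvBand60, pvBand255, PySem.Int.bor_natCast,
        pvE1 a m1 m2 hm1 hm2, pvE2 a m1 m2 m3 hm1 hm2 hm3,
        BCRYPT_MAXSALT, PySem.List.len_eq, hx1]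
    by_cases hc2 : r.length = 14
    · simp [decodeLoopA, decodeLoopB, h1, h2, h3, hne1, hne2, hne3, pvShl2, pvShl4, pvShl6,
        pvShr2, pvShr4, pvShrN, -Int.natCast_shiftRight, -Int.natCast_shiftLeft, pvBand48, pvBand15, pvBand60, pvBand255, PySem.Int.bor_natCast,
        pvE1 a m1 m2 hm1 hm2, pvE2 a m1 m2 m3 hm1 hm2 hm3,
        BCRYPT_MAXSALT, PySem.List.len_eq, hc2]
    have hx2 : ¬((r.length : Int) + 2 = 16) := by omega
    rcases pvCHAR64_cases c4 with h4 | ⟨m4, hm4, h4⟩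
    · simp [decodeLoopA, decodeLoopB, h1, h2, h3, h4, hne1, hne2, hne3, pvShl2, pvShl4, pvShl6,
        pvShr2, pvShr4, pvShrN, -Int.natCast_shiftRight, -Int.natCast_shiftLeft, pvBand48, pvBand15, pvBand60, pvBand255, PySem.Int.bor_natCast,
        pvE1 a m1 m2 hm1 hm2, pvE2 a m1 m2 m3 hm1 hm2 hm3,
        BCRYPT_MAXSALT, PySem.List.len_eq, hx1, hx2]
    have hne4 : (m4 : Int) ≠ 255 := by omega
    by_cases hc3 : r.length = 13
    · simp [decodeLoopA, decodeLoopB, h1, h2, h3, h4, hne1, hne2, hne3, hne4, pvShl2, pvShl4,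
        pvShl6, pvShr2, pvShr4, pvShrN, -Int.natCast_shiftRight, -Int.natCast_shiftLeft, pvBand48, pvBand15, pvBand60, pvBand3, pvBand255,
        PySem.Int.bor_natCast, pvE1 a m1 m2 hm1 hm2, pvE2 a m1 m2 m3 hm1 hm2 hm3,
        pvE3 a m1 m2 m3 m4 hm1 hm2 hm3 hm4,
        BCRYPT_MAXSALT, PySem.List.len_eq, hc3]
    have hx3 : ¬((r.length : Int) + 3 = 16) := by omega
    -- full group consumed: recurse on the remaining characters
    have hlen : rest3.length + 4 = n := by simpa using hcs
    have hrec := ih rest3.length (by omega) rest3 rfl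
      (r ++ [((m1 <<< 2 ||| ((m2 &&& 48) >>> 4) : Nat) : Int),
             (((m2 &&& 15) <<< 4 ||| ((m3 &&& 60) >>> 2) : Nat) : Int),
             (((m3 &&& 3) <<< 6 ||| m4 : Nat) : Int)])
      ((((a <<< 6 ||| m1) <<< 6 ||| m2) <<< 6 ||| m3) <<< 6 ||| m4) (by simp; omega)
    simp only [List.length_append, List.length_cons, List.length_nil] at hrec
    simp [decodeLoopA, decodeLoopB, h1, h2, h3, h4, hne1, hne2, hne3, hne4, pvShl2, pvShl4,
      pvShl6, pvShr2, pvShr4, pvShrN, -Int.natCast_shiftRight, -Int.natCast_shiftLeft, pvBand48, pvBand15, pvBand60, pvBand3, pvBand255,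
      PySem.Int.bor_natCast, pvE1 a m1 m2 hm1 hm2, pvE2 a m1 m2 m3 hm1 hm2 hm3,
      pvE3 a m1 m2 m3 m4 hm1 hm2 hm3 hm4,
      BCRYPT_MAXSALT, PySem.List.len_eq, hx1, hx2, hx3]
    push_cast at hrec ⊢
    rw [hrec]
    simp

-- ===== VERDICT (by name: the statement is the Claim_ definition above) =====
theorem decode_base64_spec : Claim_equal_decode_base64 := by
  intro data _
  unfold Spec_decode_base64 decode_base64 decode_base64_alt
  simpa using (pvMain data.toList.length data.toList rfl [] 0 (by norm_num)).symm
  -- dummy  data.toList.length data.toList rfl [] 0 (by norm_num)
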